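-- pv_equiv track=rewrite | github.com/cadamsdotcom/CodeLeash | scripts/tdd_common.py | _find_preceding_declaration
-- ===== SOURCE A (Python) =====
-- def _find_preceding_declaration(lines: list[str], before_index: int) -> str | None:
--     """Scan backwards from before_index to find the preceding Red/Green declaration."""
--     for i in range(before_index - 1, -1, -1):
--         stripped = lines[i].rstrip()
--         if stripped.startswith("## Green"):
--             return "green"
--         if stripped.startswith("## Red"):
--             return "red"
--     return None
-- ===== SOURCE B (Python) =====
-- def _find_preceding_declaration(lines: list[str], before_index: int) -> str | None:
--     """Track the last indices of Green/Red declarations in the prefix, then compare them."""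
--     green_at = -1
--     red_at = -1
--     for i, line in enumerate(lines[:max(before_index, 0)]):
--         s = line.rstrip()
--         if s.startswith("## Green"):
--             green_at = i
--         elif s.startswith("## Red"):
--             red_at = i
--     if green_at < 0 and red_at < 0:
--         return None
--     return "green" if green_at > red_at else "red"
-- ===== Notes on version B (the rewrite author's own statement) =====
-- stated objective: alternative
-- what changed: A's backward early-return scan is replaced by a single forward pass that records the last index of a Green and of a Red declaration in the prefix and then compares the two indices to decide the answer. Pre_ excludes before_index > len(lines), where A raises IndexError.
import Mathlib
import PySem

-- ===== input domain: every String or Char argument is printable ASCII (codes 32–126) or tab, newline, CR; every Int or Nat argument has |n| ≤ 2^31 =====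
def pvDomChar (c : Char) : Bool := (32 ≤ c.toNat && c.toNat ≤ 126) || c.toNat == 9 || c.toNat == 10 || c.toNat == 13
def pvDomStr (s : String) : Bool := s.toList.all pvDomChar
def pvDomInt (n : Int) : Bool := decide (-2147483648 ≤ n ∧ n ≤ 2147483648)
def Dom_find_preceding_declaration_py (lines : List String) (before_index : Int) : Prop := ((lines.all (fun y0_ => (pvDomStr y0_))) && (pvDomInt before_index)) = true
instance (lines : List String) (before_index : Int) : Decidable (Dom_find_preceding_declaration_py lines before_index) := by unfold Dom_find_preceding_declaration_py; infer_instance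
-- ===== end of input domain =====

-- B replaces A's backward early-return scan by tracking the last Green/Red indices in the prefix and comparing them (alternative decomposition, same cost).


-- ===== PORT A =====
-- Backward scan: for i in range(before_index-1, -1, -1), early return via an Option accumulator.
-- lines[i] ported as pyGetD with a dummy default; under Pre_ every visited index is in range.
def find_preceding_declaration_py (lines : List String) (before_index : Int) : Option String :=
  (PySem.List.pyRange (before_index - 1) (-1) (-1)).foldl
    (fun acc i =>
      match acc with
      | some v => some v
      | none =>
        let stripped := PySem.Str.rstrip (PySem.List.pyGetD lines i "")
        if PySem.Str.startswith stripped "## Green" then some "green"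
        else if PySem.Str.startswith stripped "## Red" then some "red"
        else none)
    none

-- ===== PORT B =====
-- Forward enumerate over lines[:max(before_index,0)] tracking the last Green and last Red
-- index (-1 = never seen), then compare the two indices.
def find_preceding_declaration_py_alt (lines : List String) (before_index : Int) : Option String :=
  let st := (PySem.List.enumerate (PySem.List.slice lines none (some (max before_index 0)))).foldl
    (fun (st : Int × Int) p =>
      let s := PySem.Str.rstrip p.2
      if PySem.Str.startswith s "## Green" then (p.1, st.2)
      else if PySem.Str.startswith s "## Red" then (st.1, p.1)
      else st) (-1, -1)
  if st.1 < 0 ∧ st.2 < 0 then none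
  else if st.1 > st.2 then some "green" else some "red"

-- ===== PRECONDITION & SPEC =====
-- A raises IndexError when before_index > len(lines); Pre_ excludes exactly those inputs.
def Pre_find_preceding_declaration_py (lines : List String) (before_index : Int) : Prop :=
  before_index ≤ (lines.length : Int)
instance (lines : List String) (before_index : Int) : Decidable (Pre_find_preceding_declaration_py lines before_index) := by unfold Pre_find_preceding_declaration_py; infer_instance
def pvWitness_find_preceding_declaration_py : List String × Int := (["## Red", "x", "## Green  ", "y"], 4)

def Spec_find_preceding_declaration_py (lines : List String) (before_index : Int) (out : Option String) : Prop := out = find_preceding_declaration_py_alt lines before_index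
instance (lines : List String) (before_index : Int) (out : Option String) : Decidable (Spec_find_preceding_declaration_py lines before_index out) := by unfold Spec_find_preceding_declaration_py; infer_instance

-- ===== CLAIM (what is proved, stated in full; the proofs are below) =====
def Claim_equal_find_preceding_declaration_py : Prop := ∀ (lines : List String) (before_index : Int), Dom_find_preceding_declaration_py lines before_index → Pre_find_preceding_declaration_py lines before_index → Spec_find_preceding_declaration_py lines before_index (find_preceding_declaration_py lines before_index)

-- ===== LEMMAS AND PROOFS =====

-- per-line classification: the first match a backward scan would yield on this line
def pvClassify (line : String) : Option String :=
  let stripped := PySem.Str.rstrip line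
  if PySem.Str.startswith stripped "## Green" then some "green"
  else if PySem.Str.startswith stripped "## Red" then some "red"
  else none

-- the backward first-match over a prefix, as a foldr
def pvBack (l : List String) : Option String :=
  l.foldr (fun line acc =>
    match acc with
    | some v => some v
    | none => pvClassify line) none

theorem pvBack_append_singleton (l : List String) (x : String) :
    pvBack (l ++ [x]) = match pvClassify x with
      | some v => some v
      | none => pvBack l := by
  unfold pvBack
  rw [List.foldr_append]
  cases h : pvClassify x with
  | some v =>
    simp only [List.foldr_cons, List.foldr_nil, h]
    induction l with
    | nil => simp
    | cons y ys ih => simp [ih]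
  | none => simp [h]

-- B's fold state over the enumerated prefix, with its decode
def pvStateFold (l : List String) : Int × Int :=
  (PySem.List.enumerate l).foldl
    (fun (st : Int × Int) p =>
      let s := PySem.Str.rstrip p.2
      if PySem.Str.startswith s "## Green" then (p.1, st.2)
      else if PySem.Str.startswith s "## Red" then (st.1, p.1)
      else st) (-1, -1)

def pvDecode (st : Int × Int) : Option String :=
  if st.1 < 0 ∧ st.2 < 0 then none
  else if st.1 > st.2 then some "green" else some "red"

-- Invariant: both tracked indices stay below the length, and the decoded state is the
-- backward first-match of the prefix.
theorem pv_invariant (l : List String) :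
    (pvStateFold l).1 < (l.length : Int) ∧ (pvStateFold l).2 < (l.length : Int) ∧
      pvDecode (pvStateFold l) = pvBack l := by
  induction l using List.reverseRecOn with
  | nil => refine ⟨by norm_num [pvStateFold], by norm_num [pvStateFold], by rfl⟩
  | append_singleton l x ih =>
    obtain ⟨h1, h2, h3⟩ := ih
    have hfold : pvStateFold (l ++ [x])
        = (fun (st : Int × Int) (p : Int × String) =>
            let s := PySem.Str.rstrip p.2
            if PySem.Str.startswith s "## Green" then (p.1, st.2)
            else if PySem.Str.startswith s "## Red" then (st.1, p.1)
            else st) (pvStateFold l) ((l.length : Int), x) := by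
      unfold pvStateFold
      rw [show (PySem.List.enumerate (l ++ [x]) 0)
          = PySem.List.enumerate l 0 ++ [((l.length : Int), x)] by
        rw [PySem.List.enumerate_append, PySem.List.enumerate_cons, PySem.List.enumerate_nil]
        norm_num]
      rw [List.foldl_append, List.foldl_cons, List.foldl_nil]
    rw [pvBack_append_singleton]
    simp only [List.length_append, List.length_cons, List.length_nil]
    by_cases hg : PySem.Str.startswith (PySem.Str.rstrip x) "## Green" = true
    · have hst : pvStateFold (l ++ [x]) = ((l.length : Int), (pvStateFold l).2) := by
        rw [hfold]
        show (if PySem.Str.startswith (PySem.Str.rstrip x) "## Green" = true then ((l.length : Int), (pvStateFold l).2)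
              else if PySem.Str.startswith (PySem.Str.rstrip x) "## Red" = true then ((pvStateFold l).1, (l.length : Int))
              else pvStateFold l) = _
        rw [if_pos hg]
      have hc : pvClassify x = some "green" := by
        show (if PySem.Str.startswith (PySem.Str.rstrip x) "## Green" = true then some "green"
              else if PySem.Str.startswith (PySem.Str.rstrip x) "## Red" = true then some "red"
              else none) = _
        rw [if_pos hg]
      rw [hst, hc]
      refine ⟨by push_cast; omega, by push_cast; omega, ?_⟩
      unfold pvDecode
      rw [if_neg (by simp), if_pos (by simpa using h2)]
    · by_cases hr : PySem.Str.startswith (PySem.Str.rstrip x) "## Red" = true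
      · have hst : pvStateFold (l ++ [x]) = ((pvStateFold l).1, (l.length : Int)) := by
          rw [hfold]
          show (if PySem.Str.startswith (PySem.Str.rstrip x) "## Green" = true then ((l.length : Int), (pvStateFold l).2)
              else if PySem.Str.startswith (PySem.Str.rstrip x) "## Red" = true then ((pvStateFold l).1, (l.length : Int))
              else pvStateFold l) = _
          rw [if_neg hg, if_pos hr]
        have hc : pvClassify x = some "red" := by
          show (if PySem.Str.startswith (PySem.Str.rstrip x) "## Green" = true then some "green"
              else if PySem.Str.startswith (PySem.Str.rstrip x) "## Red" = true then some "red"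
              else none) = _
          rw [if_neg hg, if_pos hr]
        rw [hst, hc]
        refine ⟨by push_cast; omega, by push_cast; omega, ?_⟩
        unfold pvDecode
        rw [if_neg (by simp), if_neg (by simpa using not_lt.mpr (le_of_lt h1))]
      · have hst : pvStateFold (l ++ [x]) = pvStateFold l := by
          rw [hfold]
          show (if PySem.Str.startswith (PySem.Str.rstrip x) "## Green" = true then ((l.length : Int), (pvStateFold l).2)
              else if PySem.Str.startswith (PySem.Str.rstrip x) "## Red" = true then ((pvStateFold l).1, (l.length : Int))
              else pvStateFold l) = _
          rw [if_neg hg, if_neg hr]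
        have hc : pvClassify x = none := by
          show (if PySem.Str.startswith (PySem.Str.rstrip x) "## Green" = true then some "green"
              else if PySem.Str.startswith (PySem.Str.rstrip x) "## Red" = true then some "red"
              else none) = _
          rw [if_neg hg, if_neg hr]
        rw [hst, hc]
        exact ⟨by push_cast; omega, by push_cast; omega, h3⟩

-- A's backward fold over indices is the first-match foldr over the fetched strings
theorem pv_foldrA_eq_map (lines : List String) (idx : List Int) :
    idx.foldr (fun i acc =>
      match acc with
      | some v => some v
      | none =>
        let stripped := PySem.Str.rstrip (PySem.List.pyGetD lines i "")
        if PySem.Str.startswith stripped "## Green" then some "green"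
        else if PySem.Str.startswith stripped "## Red" then some "red"
        else none) none
    = pvBack (idx.map (fun i => PySem.List.pyGetD lines i "")) := by
  unfold pvBack
  rw [List.foldr_map]
  rfl

-- fetching range(0, m) out of lines is the prefix take m (for m ≤ length)
theorem pv_map_getD_take (lines : List String) (m : Nat) (hm : m ≤ lines.length) :
    (PySem.List.pyRange 0 (m : Int) 1).map (fun i => PySem.List.pyGetD lines i "")
    = lines.take m := by
  induction m with
  | zero =>
    rw [PySem.List.pyRange_one_eq_nil (by norm_num)]
    simp
  | succ m ih =>
    have hml : m < lines.length := hm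
    have hcast : ((m + 1 : Nat) : Int) = ((m : Nat) : Int) + 1 := by push_cast; ring
    rw [hcast, PySem.List.pyRange_one_succ_right (by positivity), List.map_append,
      ih (Nat.le_of_succ_le hm), List.take_add_one, List.getElem?_eq_getElem hml]
    simp only [List.map_cons, List.map_nil, Option.toList]
    rw [PySem.List.pyGetD_natCast]
    rw [List.getD_eq_getElem lines "" hml]

-- ===== VERDICT (by name: the statements are the Claim_ definitions above) =====
theorem find_preceding_declaration_py_spec : Claim_equal_find_preceding_declaration_py := by
  intro lines before_index _hdom hpre
  unfold Spec_find_preceding_declaration_py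
  unfold Pre_find_preceding_declaration_py at hpre
  by_cases hb : before_index ≤ 0
  · unfold find_preceding_declaration_py find_preceding_declaration_py_alt
    rw [PySem.List.pyRange_neg_one_eq_nil (by omega)]
    have hm : max before_index 0 = ((0 : Nat) : Int) := by omega
    rw [hm, PySem.List.slice_to_natCast]
    rfl
  · set n : Nat := before_index.toNat with hn
    have hbe : before_index = (n : Int) := by omega
    have hmax : max before_index 0 = (n : Int) := by omega
    have hlen : n ≤ lines.length := by omega
    have hB : find_preceding_declaration_py_alt lines before_index
        = pvDecode (pvStateFold (lines.take n)) := by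
      unfold find_preceding_declaration_py_alt
      rw [hmax, PySem.List.slice_to_natCast]
      rfl
    have hA : find_preceding_declaration_py lines before_index = pvBack (lines.take n) := by
      unfold find_preceding_declaration_py
      have hrange : PySem.List.pyRange (before_index - 1) (-1) (-1)
          = (PySem.List.pyRange 0 (n : Int) 1).reverse := by
        rw [PySem.List.pyRange_neg_one_eq_reverse]
        norm_num [hbe]
      rw [hrange, List.foldl_reverse, pv_foldrA_eq_map, pv_map_getD_take lines n hlen]
    rw [hA, hB, (pv_invariant (lines.take n)).2.2]
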